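-- pv_equiv track=rewrite | github.com/MartiN9919/sp | backend_loaders/lib/funText.py | urlAjaxParse
-- ===== SOURCE A (Python) =====
-- def urlAjaxParse(urlAjax, skipFirst=0):
--     ret   = []
--     count = -1
--     for item in urlAjax.split('/'):
--         if item=='': continue
--         count += 1
--         if count < skipFirst: continue
--         ret.append(item)
--     return ret
-- ===== SOURCE B (Python) =====
-- def urlAjaxParse(urlAjax, skipFirst=0):
--     ret = []
--     seg = ''
--     remaining = skipFirst
--     for ch in urlAjax + '/':
--         if ch == '/':
--             if seg:
--                 if remaining > 0:
--                     remaining -= 1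
--                 else:
--                     ret.append(seg)
--             seg = ''
--         else:
--             seg += ch
--     return ret
-- ===== Notes on version B (the rewrite author's own statement) =====
-- stated objective: alternative
-- what changed: B never calls split: it is a single character-level state machine that scans the string once with a trailing separator appended, accumulating the current segment, flushing it at each separator, and consuming a decrementing remaining-skip counter, instead of A's split-then-count loop over pre-made segments.
import Mathlib
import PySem

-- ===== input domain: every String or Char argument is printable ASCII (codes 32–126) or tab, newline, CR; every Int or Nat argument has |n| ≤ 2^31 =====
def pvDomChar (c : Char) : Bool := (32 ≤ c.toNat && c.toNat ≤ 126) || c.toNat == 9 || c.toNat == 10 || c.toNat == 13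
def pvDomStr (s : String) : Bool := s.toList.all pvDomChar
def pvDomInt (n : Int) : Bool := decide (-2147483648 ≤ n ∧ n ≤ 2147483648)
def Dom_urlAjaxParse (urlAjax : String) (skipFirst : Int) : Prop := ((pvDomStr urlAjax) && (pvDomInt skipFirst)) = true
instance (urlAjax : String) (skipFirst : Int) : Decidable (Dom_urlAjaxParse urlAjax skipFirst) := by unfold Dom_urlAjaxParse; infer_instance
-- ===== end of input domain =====

-- B replaces A's split-then-count loop by a single character-level state machine scanning the string once with a trailing separator appended (no split, a remaining-skip counter); return value only, no mutation involved.

-- ===== PORT A =====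
def urlAjaxParse (urlAjax : String) (skipFirst : Int) : List String :=
  let st := ((PySem.Chars.splitOn urlAjax.toList ['/']).map String.ofList).foldl
    (fun (st : List String × Int) item =>
      if item = "" then st
      else
        let count := st.2 + 1
        if count < skipFirst then (st.1, count)
        else (st.1 ++ [item], count))
    ([], -1)
  st.1

-- ===== PORT B =====
def urlAjaxParse_alt (urlAjax : String) (skipFirst : Int) : List String :=
  let st := (urlAjax.toList ++ ['/']).foldl
    (fun (st : List String × List Char × Int) ch =>
      if ch = '/' then
        if st.2.1 ≠ [] then
          if st.2.2 > 0 then (st.1, [], st.2.2 - 1)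
          else (st.1 ++ [String.ofList st.2.1], [], st.2.2)
        else (st.1, [], st.2.2)
      else (st.1, st.2.1 ++ [ch], st.2.2))
    ([], [], skipFirst)
  st.1

-- ===== PRECONDITION & SPEC =====
def Spec_urlAjaxParse (urlAjax : String) (skipFirst : Int) (out : List String) : Prop := out = urlAjaxParse_alt urlAjax skipFirst
instance (urlAjax : String) (skipFirst : Int) (out : List String) : Decidable (Spec_urlAjaxParse urlAjax skipFirst out) := by unfold Spec_urlAjaxParse; infer_instance

-- ===== CLAIM (what is proved, stated in full; the proofs are below) =====
def Claim_equal_urlAjaxParse : Prop := ∀ (urlAjax : String) (skipFirst : Int), Dom_urlAjaxParse urlAjax skipFirst → Spec_urlAjaxParse urlAjax skipFirst (urlAjaxParse urlAjax skipFirst)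

-- ===== LEMMAS AND PROOFS =====

-- reference split on a single separator char, forward-accumulating the current segment
def pvSplit (c : Char) : List Char → List Char → List (List Char)
  | [], cur => [cur]
  | x :: rest, cur => if x = c then cur :: pvSplit c rest [] else pvSplit c rest (cur ++ [x])

-- per-segment processing shared by both sides (B's remaining-skip semantics)
def pvSeg (st : List String × Int) (s : List Char) : List String × Int :=
  if s = [] then st
  else if st.2 > 0 then (st.1, st.2 - 1)
  else (st.1 ++ [String.ofList s], st.2)

theorem splitOn_go_char (c : Char) (fuel : Nat) (l cur : List Char) (acc : List (List Char))
    (h : l.length < fuel) :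
    PySem.Chars.splitOn.go [c] fuel l cur acc = acc.reverse ++ pvSplit c l cur.reverse := by
  induction fuel generalizing l cur acc with
  | zero => omega
  | succ n ih =>
    cases l with
    | nil => simp [PySem.Chars.splitOn.go, pvSplit]
    | cons x rest =>
      by_cases hx : x = c
      · have hpre : List.isPrefixOf [c] (x :: rest) = true := by
          simp [List.isPrefixOf, hx]
        rw [PySem.Chars.splitOn.go]
        simp only [hpre, if_pos rfl]
        rw [ih _ _ _ (by simpa using Nat.lt_of_succ_lt_succ h)]
        simp [pvSplit, hx]
      · have hpre : List.isPrefixOf [c] (x :: rest) = false := by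
          simp [List.isPrefixOf]; exact fun hcx => absurd hcx.symm hx
        rw [PySem.Chars.splitOn.go]
        simp only [hpre]
        rw [if_neg (by simp)]
        rw [ih _ _ _ (by simpa using Nat.lt_of_succ_lt_succ h)]
        simp [pvSplit, hx]

theorem splitOn_char (c : Char) (cs : List Char) :
    PySem.Chars.splitOn cs [c] = pvSplit c cs [] := by
  unfold PySem.Chars.splitOn
  rw [splitOn_go_char c _ cs [] [] (by omega)]
  simp

theorem ofList_eq_empty_iff (s : List Char) : (String.ofList s = "") ↔ s = [] := by
  constructor
  · intro h
    have := congrArg String.toList h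
    simpa using this
  · intro h; simp [h]

-- A's counter loop over ready segments equals the remaining-skip fold; once the skip budget is
-- spent the counter keeps moving while rem stays nonpositive, hence the disjunctive invariant
theorem a_loop_eq_pvSeg (skipFirst : Int) (segs : List (List Char)) (ret : List String) (cnt rem : Int)
    (hrel : rem = skipFirst - cnt - 1 ∨ (rem ≤ 0 ∧ skipFirst ≤ cnt + 1)) :
    ((segs.map String.ofList).foldl
      (fun (st : List String × Int) item =>
        if item = "" then st
        else
          let count := st.2 + 1
          if count < skipFirst then (st.1, count)
          else (st.1 ++ [item], count))
      (ret, cnt)).1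
    = (segs.foldl pvSeg (ret, rem)).1 := by
  induction segs generalizing ret cnt rem with
  | nil => simp
  | cons s rest ih =>
    by_cases hs : s = []
    · simp only [List.map_cons, List.foldl_cons]
      rw [if_pos (by simp [hs])]
      rw [show pvSeg (ret, rem) s = (ret, rem) by unfold pvSeg; rw [if_pos hs]]
      exact ih ret cnt rem hrel
    · simp only [List.map_cons, List.foldl_cons]
      rw [if_neg (fun h => hs ((ofList_eq_empty_iff s).mp h))]
      by_cases hlt : cnt + 1 < skipFirst
      · have hrem : rem = skipFirst - cnt - 1 := by rcases hrel with h | h <;> omega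
        simp only [if_pos hlt]
        rw [show pvSeg (ret, rem) s = (ret, rem - 1) by
          unfold pvSeg; rw [if_neg hs, if_pos (by omega)]]
        exact ih ret (cnt + 1) (rem - 1) (Or.inl (by omega))
      · have hrem : rem ≤ 0 := by rcases hrel with h | h <;> omega
        simp only [if_neg hlt]
        rw [show pvSeg (ret, rem) s = (ret ++ [String.ofList s], rem) by
          unfold pvSeg; rw [if_neg hs, if_neg (by omega)]]
        exact ih (ret ++ [String.ofList s]) (cnt + 1) rem (Or.inr ⟨hrem, by omega⟩)

-- B's char scan (with the trailing separator appended) equals the per-segment fold over pvSplit of l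
theorem b_scan_eq_pvSeg (l : List Char) (ret : List String) (seg : List Char) (rem : Int) :
    ((l ++ ['/']).foldl
      (fun (st : List String × List Char × Int) ch =>
        if ch = '/' then
          if st.2.1 ≠ [] then
            if st.2.2 > 0 then (st.1, [], st.2.2 - 1)
            else (st.1 ++ [String.ofList st.2.1], [], st.2.2)
          else (st.1, [], st.2.2)
        else (st.1, st.2.1 ++ [ch], st.2.2))
      (ret, seg, rem)).1
    = ((pvSplit '/' l seg).foldl pvSeg (ret, rem)).1 := by
  induction l generalizing ret seg rem with
  | nil =>
    by_cases hs : seg = []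
    · simp [hs, pvSplit, pvSeg]
    · by_cases hr : rem > 0 <;> simp [hs, hr, pvSplit, pvSeg]
  | cons x rest ih =>
    by_cases hx : x = '/'
    · by_cases hs : seg = []
      · simp only [List.cons_append, List.foldl_cons]
        rw [if_pos hx, if_neg (by simp [hs]), ih]
        simp only [pvSplit, if_pos hx]
        rw [List.foldl_cons, show pvSeg (ret, rem) seg = (ret, rem) by
          unfold pvSeg; rw [if_pos hs]]
      · by_cases hr : rem > 0
        · simp only [List.cons_append, List.foldl_cons]
          rw [if_pos hx, if_pos (by simpa using hs), if_pos hr, ih]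
          simp only [pvSplit, if_pos hx]
          rw [List.foldl_cons, show pvSeg (ret, rem) seg = (ret, rem - 1) by
            unfold pvSeg; rw [if_neg hs, if_pos hr]]
        · simp only [List.cons_append, List.foldl_cons]
          rw [if_pos hx, if_pos (by simpa using hs), if_neg hr, ih]
          simp only [pvSplit, if_pos hx]
          rw [List.foldl_cons, show pvSeg (ret, rem) seg = (ret ++ [String.ofList seg], rem) by
            unfold pvSeg; rw [if_neg hs, if_neg hr]]
    · simp only [List.cons_append, List.foldl_cons]
      rw [if_neg hx, ih]
      simp [pvSplit, hx]

-- ===== VERDICT (by name: the statement is the Claim_ definition above) =====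
theorem urlAjaxParse_spec : Claim_equal_urlAjaxParse := by
  intro urlAjax skipFirst _
  unfold Spec_urlAjaxParse urlAjaxParse urlAjaxParse_alt
  rw [splitOn_char, b_scan_eq_pvSeg,
    a_loop_eq_pvSeg skipFirst _ _ (-1) skipFirst (Or.inl (by omega))]
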